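-- pv_equiv track=rewrite | github.com/RecklessRonan/stock_master | src/stock_master/portfolio/watchlist.py | categorize_watchlist
-- ===== SOURCE A (Python) =====
-- def categorize_watchlist(watchlist: dict) -> dict[str, list[dict]]:
--     """按三分类整理观察清单."""
--     categories: dict[str, list[dict]] = {
--         "ready": [],
--         "wait_price": [],
--         "avoid": [],
--     }
--     for stock in watchlist.get("stocks", []):
--         bucket = stock.get("bucket", "ready")
--         categories.get(bucket, categories["ready"]).append(stock)
--     return categories
-- ===== SOURCE B (Python) =====
-- def categorize_watchlist(watchlist: dict) -> dict[str, list[dict]]: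
--     """按三分类整理观察清单."""
--     stocks = watchlist.get("stocks", [])
--     return {
--         "ready": [s for s in stocks
--                   if s.get("bucket", "ready") not in ("wait_price", "avoid")],
--         "wait_price": [s for s in stocks
--                        if s.get("bucket", "ready") == "wait_price"],
--         "avoid": [s for s in stocks
--                   if s.get("bucket", "ready") == "avoid"],
--     }
-- ===== Notes on version B (the rewrite author's own statement) =====
-- stated objective: simpler
-- what changed: Replaces the single dispatch loop that appends each stock into a mutable three-key dict (with a get-with-default fallback to the ready list) by three independent filtering comprehensions, one per category, returned as a literal dict.
import Mathlib
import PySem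

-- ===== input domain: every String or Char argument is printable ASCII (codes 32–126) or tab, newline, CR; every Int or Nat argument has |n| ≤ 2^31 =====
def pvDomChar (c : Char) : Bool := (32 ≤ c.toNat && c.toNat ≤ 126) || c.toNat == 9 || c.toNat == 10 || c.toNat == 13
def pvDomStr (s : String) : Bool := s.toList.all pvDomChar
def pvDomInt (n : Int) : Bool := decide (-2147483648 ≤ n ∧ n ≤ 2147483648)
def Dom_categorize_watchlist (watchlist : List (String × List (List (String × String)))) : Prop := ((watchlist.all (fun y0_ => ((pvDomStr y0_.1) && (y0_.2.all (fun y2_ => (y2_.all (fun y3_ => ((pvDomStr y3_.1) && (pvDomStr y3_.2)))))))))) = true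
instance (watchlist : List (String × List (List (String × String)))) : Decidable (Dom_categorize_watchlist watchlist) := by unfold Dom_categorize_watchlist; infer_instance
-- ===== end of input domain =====

-- B replaces A's single dispatch loop over a mutable three-key dict by three independent
-- filtering passes (objective: simpler). Equivalence of the return value is proved below.

-- ===== PORT A =====
def categorize_watchlist (watchlist : List (String × List (List (String × String)))) : List (String × List (List (String × String))) :=
  -- categories = {"ready": [], "wait_price": [], "avoid": []}
  let categories : PySem.Dict String (List (List (String × String))) :=
    ((PySem.Dict.empty.insert "ready" []).insert "wait_price" []).insert "avoid" []
  -- for stock in watchlist.get("stocks", []): …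
  let final := (PySem.Dict.getD (PySem.Dict.mk watchlist) "stocks" []).foldl
    (fun cats stock =>
      let bucket := PySem.Dict.getD (PySem.Dict.mk stock) "bucket" "ready"
      -- categories.get(bucket, categories["ready"]).append(stock): Python appends to the
      -- aliased list object — the entry for bucket if present, else the "ready" entry.
      let key := if (cats.get? bucket).isSome then bucket else "ready"
      cats.modify key [] (fun l => l ++ [stock]))
    categories
  final.items

-- ===== PORT B =====
def categorize_watchlist_alt (watchlist : List (String × List (List (String × String)))) : List (String × List (List (String × String))) :=
  let stocks := PySem.Dict.getD (PySem.Dict.mk watchlist) "stocks" []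
  let bucket := fun (s : List (String × String)) => PySem.Dict.getD (PySem.Dict.mk s) "bucket" "ready"
  [("ready", stocks.filter (fun s => !(bucket s == "wait_price") && !(bucket s == "avoid"))),
   ("wait_price", stocks.filter (fun s => bucket s == "wait_price")),
   ("avoid", stocks.filter (fun s => bucket s == "avoid"))]

-- ===== PRECONDITION & SPEC =====
def Spec_categorize_watchlist (watchlist : List (String × List (List (String × String)))) (out : List (String × List (List (String × String)))) : Prop := out = categorize_watchlist_alt watchlist
instance (watchlist : List (String × List (List (String × String)))) (out : List (String × List (List (String × String)))) : Decidable (Spec_categorize_watchlist watchlist out) := by unfold Spec_categorize_watchlist; infer_instance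

-- ===== CLAIM (what is proved, stated in full; the proofs are below) =====
def Claim_equal_categorize_watchlist : Prop := ∀ (watchlist : List (String × List (List (String × String)))), Dom_categorize_watchlist watchlist → Spec_categorize_watchlist watchlist (categorize_watchlist watchlist)

-- ===== LEMMAS AND PROOFS =====

-- One step of A's dispatch loop on a three-entry state, by cases on the bucket string.
theorem pvStep (s : List (String × String)) (r w a : List (List (String × String))) :
    (let bucket := PySem.Dict.getD (PySem.Dict.mk s) "bucket" "ready"
     let key := if ((PySem.Dict.mk [("ready", r), ("wait_price", w), ("avoid", a)]).get? bucket).isSome then bucket else "ready"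
     (PySem.Dict.mk [("ready", r), ("wait_price", w), ("avoid", a)]).modify key [] (fun l => l ++ [s])) =
    (if PySem.Dict.getD (PySem.Dict.mk s) "bucket" "ready" = "wait_price" then
      PySem.Dict.mk [("ready", r), ("wait_price", w ++ [s]), ("avoid", a)]
    else if PySem.Dict.getD (PySem.Dict.mk s) "bucket" "ready" = "avoid" then
      PySem.Dict.mk [("ready", r), ("wait_price", w), ("avoid", a ++ [s])]
    else
      PySem.Dict.mk [("ready", r ++ [s]), ("wait_price", w), ("avoid", a)]) := by
  show (PySem.Dict.mk [("ready", r), ("wait_price", w), ("avoid", a)]).modify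
      (if ((PySem.Dict.mk [("ready", r), ("wait_price", w), ("avoid", a)]).get?
            (PySem.Dict.getD (PySem.Dict.mk s) "bucket" "ready")).isSome
       then PySem.Dict.getD (PySem.Dict.mk s) "bucket" "ready" else "ready")
      [] (fun l => l ++ [s]) = _
  generalize PySem.Dict.getD (PySem.Dict.mk s) "bucket" "ready" = b
  by_cases h1 : b = "wait_price"
  · subst h1
    simp [PySem.Dict.get?, PySem.Dict.modify, PySem.Dict.contains, PySem.Dict.insert, PySem.Dict.getD]
  · by_cases h2 : b = "avoid"
    · subst h2
      simp [PySem.Dict.get?, PySem.Dict.modify, PySem.Dict.contains, PySem.Dict.insert, PySem.Dict.getD]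
    · by_cases h3 : b = "ready"
      · subst h3
        simp [PySem.Dict.get?, PySem.Dict.modify, PySem.Dict.contains, PySem.Dict.insert, PySem.Dict.getD]
      · simp [PySem.Dict.get?, PySem.Dict.modify, PySem.Dict.contains, PySem.Dict.insert,
          PySem.Dict.getD, h1, h2, h3, Ne.symm h1, Ne.symm h2, Ne.symm h3]

-- Loop invariant: running A's dispatch loop from any three-entry state appends B's three filters.
theorem pvLoop (stocks : List (List (String × String))) (r w a : List (List (String × String))) :
    (stocks.foldl
      (fun cats stock =>
        let bucket := PySem.Dict.getD (PySem.Dict.mk stock) "bucket" "ready"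
        let key := if (cats.get? bucket).isSome then bucket else "ready"
        cats.modify key [] (fun l => l ++ [stock]))
      (PySem.Dict.mk [("ready", r), ("wait_price", w), ("avoid", a)])) =
    PySem.Dict.mk
      [("ready", r ++ stocks.filter (fun s => !(PySem.Dict.getD (PySem.Dict.mk s) "bucket" "ready" == "wait_price") && !(PySem.Dict.getD (PySem.Dict.mk s) "bucket" "ready" == "avoid"))),
       ("wait_price", w ++ stocks.filter (fun s => PySem.Dict.getD (PySem.Dict.mk s) "bucket" "ready" == "wait_price")),
       ("avoid", a ++ stocks.filter (fun s => PySem.Dict.getD (PySem.Dict.mk s) "bucket" "ready" == "avoid"))] := by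
  induction stocks generalizing r w a with
  | nil => simp
  | cons s rest ih =>
    rw [List.foldl_cons, pvStep s r w a]
    by_cases h1 : PySem.Dict.getD (PySem.Dict.mk s) "bucket" "ready" = "wait_price"
    · rw [if_pos h1, ih]
      simp [List.filter_cons, h1]
    · rw [if_neg h1]
      by_cases h2 : PySem.Dict.getD (PySem.Dict.mk s) "bucket" "ready" = "avoid"
      · rw [if_pos h2, ih]
        simp [List.filter_cons, h2]
      · rw [if_neg h2, ih]
        simp [h1, h2]

-- ===== VERDICT (by name: the statement is the Claim_ definition above) =====
theorem categorize_watchlist_spec : Claim_equal_categorize_watchlist := by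
  intro watchlist _
  show categorize_watchlist watchlist = categorize_watchlist_alt watchlist
  have hinit : (((PySem.Dict.empty.insert "ready" ([] : List (List (String × String)))).insert "wait_price" []).insert "avoid" []) =
      PySem.Dict.mk [("ready", []), ("wait_price", []), ("avoid", [])] := by decide
  show ((PySem.Dict.getD (PySem.Dict.mk watchlist) "stocks" []).foldl
      (fun cats stock =>
        let bucket := PySem.Dict.getD (PySem.Dict.mk stock) "bucket" "ready"
        let key := if (cats.get? bucket).isSome then bucket else "ready"
        cats.modify key [] (fun l => l ++ [stock]))
      (((PySem.Dict.empty.insert "ready" []).insert "wait_price" []).insert "avoid" [])).items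
    = categorize_watchlist_alt watchlist
  rw [hinit, pvLoop]
  simp [categorize_watchlist_alt]
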